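-- pv_equiv track=rewrite | github.com/fabjav/ProcesamientoRadar2026 | ObtenerDBZ.py | rellenar_huecos
-- ===== SOURCE A (Python) =====
-- def rellenar_huecos(matriz):
--     alto = len(matriz)
--     ancho = len(matriz[0])
--     nueva = [fila[:] for fila in matriz]
--
--     for i in range(alto):
--         for j in range(ancho):
--             if matriz[i][j] == 0:
--                 vecinos = []
--
--                 for di, dj in [(-1,0),(1,0),(0,-1),(0,1)]:
--                     ni, nj = i + di, j + dj
--                     if 0 <= ni < alto and 0 <= nj < ancho:
--                         if matriz[ni][nj] != 0:
--                             vecinos.append(matriz[ni][nj])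
--
--                 if len(vecinos) >= 2:
--                     nueva[i][j] = int(sum(vecinos) / len(vecinos))
--
--     return nueva
-- ===== SOURCE B (Python) =====
-- def rellenar_huecos(matriz):
--     alto = len(matriz)
--     ancho = len(matriz[0])
--
--     # Scatter pass: every nonzero cell adds its value into sum/count
--     # accumulators at its four in-bounds orthogonal neighbours.
--     suma = [[0] * ancho for _ in range(alto)]
--     conteo = [[0] * ancho for _ in range(alto)]
--     for i in range(alto):
--         for j in range(ancho):
--             v = matriz[i][j]
--             if v != 0:
--                 if i > 0:
--                     suma[i-1][j] += v
--                     conteo[i-1][j] += 1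
--                 if i + 1 < alto:
--                     suma[i+1][j] += v
--                     conteo[i+1][j] += 1
--                 if j > 0:
--                     suma[i][j-1] += v
--                     conteo[i][j-1] += 1
--                 if j + 1 < ancho:
--                     suma[i][j+1] += v
--                     conteo[i][j+1] += 1
--
--     # Fill pass: a zero cell with at least two contributing neighbours
--     # becomes the truncated mean of their values.
--     nueva = [fila[:] for fila in matriz]
--     for i in range(alto):
--         for j in range(ancho):
--             if matriz[i][j] == 0 and conteo[i][j] >= 2:
--                 nueva[i][j] = int(suma[i][j] / conteo[i][j])
--     return nueva
-- ===== Notes on version B (the rewrite author's own statement) =====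
-- stated objective: alternative
-- what changed: A gathers: for each zero cell it scans the four neighbour offsets, collects the nonzero neighbour values into a list and averages it; B scatters: one pass adds every nonzero cell's value into sum/count accumulator tables at its four in-bounds neighbours, then a second pass fills each zero cell with count >= 2 from the accumulators, so no per-cell neighbour list is ever built.
import Mathlib
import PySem

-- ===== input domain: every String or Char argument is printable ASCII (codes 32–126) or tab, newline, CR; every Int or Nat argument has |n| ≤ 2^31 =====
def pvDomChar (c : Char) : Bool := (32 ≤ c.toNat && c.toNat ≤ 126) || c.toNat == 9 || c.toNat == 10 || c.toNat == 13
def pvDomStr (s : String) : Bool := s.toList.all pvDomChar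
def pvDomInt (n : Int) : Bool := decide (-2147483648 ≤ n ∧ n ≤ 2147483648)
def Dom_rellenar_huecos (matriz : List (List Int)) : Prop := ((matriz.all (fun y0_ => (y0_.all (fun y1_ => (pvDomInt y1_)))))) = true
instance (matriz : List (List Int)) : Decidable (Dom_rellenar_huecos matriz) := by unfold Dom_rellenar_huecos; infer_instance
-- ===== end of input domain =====

-- B replaces A's per-cell neighbour gathering (a delta-offset scan collecting a list for each
-- zero cell) by a scatter pass: every nonzero cell adds its value into sum/count accumulator
-- tables at its four in-bounds neighbours, and a second pass fills zero cells with count >= 2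
-- from the accumulators (objective: alternative algorithm, no per-cell neighbour list).


-- ===== PORT A =====
-- nueva[i][j] = v  (indices known in range)
def pySet2 (m : List (List Int)) (i j : Int) (v : Int) : List (List Int) :=
  PySem.List.pySetD m i (PySem.List.pySetD (PySem.List.pyGetD m i []) j v)

def rellenar_huecos (matriz : List (List Int)) : List (List Int) :=
  let alto : Int := matriz.length
  let ancho : Int := (PySem.List.pyGetD matriz 0 []).length
  let nueva := matriz.map (fun fila => PySem.List.slice fila none none)
  (PySem.List.pyRange 0 alto 1).foldl (fun nueva i =>
    (PySem.List.pyRange 0 ancho 1).foldl (fun nueva j =>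
      if PySem.List.pyGetD (PySem.List.pyGetD matriz i []) j 0 = 0 then
        let vecinos := ([((-1:Int),(0:Int)),(1,0),(0,-1),(0,1)]).foldl (fun vecinos dij =>
          let ni := i + dij.1
          let nj := j + dij.2
          if 0 ≤ ni ∧ ni < alto ∧ 0 ≤ nj ∧ nj < ancho then
            if PySem.List.pyGetD (PySem.List.pyGetD matriz ni []) nj 0 ≠ 0 then
              vecinos ++ [PySem.List.pyGetD (PySem.List.pyGetD matriz ni []) nj 0]
            else vecinos
          else vecinos) ([] : List Int)
        if 2 ≤ vecinos.length then
          pySet2 nueva i j (PySem.Int.truncdiv vecinos.sum vecinos.length)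
        else nueva
      else nueva) nueva) nueva

-- ===== PORT B =====
-- t[i][j] += v  (indices known in range)
def incr2 (t : List (List Int)) (i j : Int) (v : Int) : List (List Int) :=
  PySem.List.pySetD t i (PySem.List.pySetD (PySem.List.pyGetD t i []) j
    (PySem.List.pyGetD (PySem.List.pyGetD t i []) j 0 + v))

-- [[0]*ancho for _ in range(alto)]
def zeroTable (alto ancho : Nat) : List (List Int) :=
  (List.range alto).map (fun _ => List.replicate ancho 0)

def rellenar_huecos_alt (matriz : List (List Int)) : List (List Int) :=
  let alto : Int := matriz.length
  let ancho : Int := (PySem.List.pyGetD matriz 0 []).length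
  -- scatter pass over (suma, conteo)
  let sc :=
    (PySem.List.pyRange 0 alto 1).foldl (fun sc i =>
      (PySem.List.pyRange 0 ancho 1).foldl (fun sc j =>
        let v := PySem.List.pyGetD (PySem.List.pyGetD matriz i []) j 0
        if v ≠ 0 then
          let sc := if 0 < i then (incr2 sc.1 (i-1) j v, incr2 sc.2 (i-1) j 1) else sc
          let sc := if i + 1 < alto then (incr2 sc.1 (i+1) j v, incr2 sc.2 (i+1) j 1) else sc
          let sc := if 0 < j then (incr2 sc.1 i (j-1) v, incr2 sc.2 i (j-1) 1) else sc
          let sc := if j + 1 < ancho then (incr2 sc.1 i (j+1) v, incr2 sc.2 i (j+1) 1) else sc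
          sc
        else sc) sc)
      (zeroTable matriz.length (PySem.List.pyGetD matriz 0 []).length,
       zeroTable matriz.length (PySem.List.pyGetD matriz 0 []).length)
  -- fill pass
  let nueva := matriz.map (fun fila => PySem.List.slice fila none none)
  (PySem.List.pyRange 0 alto 1).foldl (fun nueva i =>
    (PySem.List.pyRange 0 ancho 1).foldl (fun nueva j =>
      if PySem.List.pyGetD (PySem.List.pyGetD matriz i []) j 0 = 0 ∧
          2 ≤ PySem.List.pyGetD (PySem.List.pyGetD sc.2 i []) j 0 then
        pySet2 nueva i j (PySem.Int.truncdiv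
          (PySem.List.pyGetD (PySem.List.pyGetD sc.1 i []) j 0)
          (PySem.List.pyGetD (PySem.List.pyGetD sc.2 i []) j 0))
      else nueva) nueva) nueva

-- ===== PRECONDITION & SPEC =====
-- Pre_ is exactly where the Python A returns normally: on [] it raises IndexError at matriz[0],
-- and it raises IndexError whenever some row is shorter than len(matriz[0]) (every column index
-- below len(matriz[0]) is read in every row).
def Pre_rellenar_huecos (matriz : List (List Int)) : Prop :=
  matriz ≠ [] ∧ ∀ fila ∈ matriz, (matriz.getD 0 []).length ≤ fila.length
instance (matriz : List (List Int)) : Decidable (Pre_rellenar_huecos matriz) := by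
  unfold Pre_rellenar_huecos; infer_instance

def pvWitness_rellenar_huecos : List (List Int) := [[0, 1], [2, 0], [0, 5]]

def Spec_rellenar_huecos (matriz : List (List Int)) (out : List (List Int)) : Prop :=
  out = rellenar_huecos_alt matriz
instance (matriz : List (List Int)) (out : List (List Int)) :
    Decidable (Spec_rellenar_huecos matriz out) := by unfold Spec_rellenar_huecos; infer_instance

-- ===== CLAIM (what is proved, stated in full; the proofs are below) =====
def Claim_equal_rellenar_huecos : Prop := ∀ (matriz : List (List Int)),
  Dom_rellenar_huecos matriz → Pre_rellenar_huecos matriz →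
  Spec_rellenar_huecos matriz (rellenar_huecos matriz)

-- ===== LEMMAS AND PROOFS =====
-- Pointwise description both ports are reduced to: vecList is the list of nonzero orthogonal
-- neighbours of cell (i, j), cellVal its filled value, rowSpec/target the full grid.
def vecList (matriz : List (List Int)) (i j : Nat) : List Int :=
  let fila := matriz.getD i []
  let vec : List Int := []
  let vec := if 0 < i ∧ (matriz.getD (i-1) []).getD j 0 ≠ 0 then
      vec ++ [(matriz.getD (i-1) []).getD j 0] else vec
  let vec := if i + 1 < matriz.length ∧ (matriz.getD (i+1) []).getD j 0 ≠ 0 then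
      vec ++ [(matriz.getD (i+1) []).getD j 0] else vec
  let vec := if 0 < j ∧ fila.getD (j-1) 0 ≠ 0 then vec ++ [fila.getD (j-1) 0] else vec
  let vec := if j + 1 < (matriz.getD 0 []).length ∧ fila.getD (j+1) 0 ≠ 0 then
      vec ++ [fila.getD (j+1) 0] else vec
  vec

def cellVal (matriz : List (List Int)) (i j : Nat) : Int :=
  let v := (matriz.getD i []).getD j 0
  if v ≠ 0 then v
  else if 2 ≤ (vecList matriz i j).length then
    PySem.Int.truncdiv (vecList matriz i j).sum ((vecList matriz i j).length)
  else v

def rowSpec (matriz : List (List Int)) (i : Nat) : List Int :=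
  (List.range (matriz.getD 0 []).length).map (cellVal matriz i) ++
    (matriz.getD i []).drop (matriz.getD 0 []).length

def target (matriz : List (List Int)) : List (List Int) :=
  (List.range matriz.length).map (rowSpec matriz)

def stepA (matriz s : List (List Int)) (i j : Nat) : List (List Int) :=
  if (matriz.getD i []).getD j 0 = 0 ∧ 2 ≤ (vecList matriz i j).length then
    s.set i ((s.getD i []).set j
      (PySem.Int.truncdiv (vecList matriz i j).sum ((vecList matriz i j).length)))
  else s

def rowStep (matriz s : List (List Int)) (i : Nat) : List (List Int) :=
  (List.range (matriz.getD 0 []).length).foldl (fun s' j => stepA matriz s' i j) s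

theorem vecA (matriz : List (List Int)) (i j : Nat) (hi : i < matriz.length)
    (hj : j < (matriz.getD 0 []).length) :
    ([((-1:Int),(0:Int)),(1,0),(0,-1),(0,1)]).foldl (fun vecinos dij =>
        let ni := (i:Int) + dij.1
        let nj := (j:Int) + dij.2
        if 0 ≤ ni ∧ ni < (matriz.length : Int) ∧ 0 ≤ nj ∧ nj < ((matriz.getD 0 []).length : Int) then
          if PySem.List.pyGetD (PySem.List.pyGetD matriz ni []) nj 0 ≠ 0 then
            vecinos ++ [PySem.List.pyGetD (PySem.List.pyGetD matriz ni []) nj 0]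
          else vecinos
        else vecinos) ([] : List Int) = vecList matriz i j := by
  unfold vecList
  simp only [List.foldl_cons, List.foldl_nil]
  rw [show ((i:Int) + 1) = ((i+1 : Nat) : Int) from by omega,
      show ((j:Int) + 1) = ((j+1 : Nat) : Int) from by omega,
      show ((i:Int) + 0) = ((i : Nat) : Int) from by omega,
      show ((j:Int) + 0) = ((j : Nat) : Int) from by omega]
  by_cases hu : 0 < i <;> by_cases hd : i + 1 < matriz.length <;> by_cases hl : 0 < j <;>
    by_cases hr : j + 1 < (matriz.getD 0 []).length
  all_goals
    simp only [
      show (0 ≤ (i:Int) + -1 ∧ ((i:Int) + -1) < (matriz.length : Int) ∧ 0 ≤ ((j:Nat):Int) ∧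
          ((j:Nat):Int) < ((matriz.getD 0 []).length : Int)) = (0 < i) from propext (by omega),
      show (0 ≤ ((i+1:Nat):Int) ∧ ((i+1:Nat):Int) < (matriz.length : Int) ∧ 0 ≤ ((j:Nat):Int) ∧
          ((j:Nat):Int) < ((matriz.getD 0 []).length : Int)) = (i + 1 < matriz.length)
        from propext (by omega),
      show (0 ≤ ((i:Nat):Int) ∧ ((i:Nat):Int) < (matriz.length : Int) ∧ 0 ≤ (j:Int) + -1 ∧
          ((j:Int) + -1) < ((matriz.getD 0 []).length : Int)) = (0 < j) from propext (by omega),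
      show (0 ≤ ((i:Nat):Int) ∧ ((i:Nat):Int) < (matriz.length : Int) ∧ 0 ≤ ((j+1:Nat):Int) ∧
          ((j+1:Nat):Int) < ((matriz.getD 0 []).length : Int)) = (j + 1 < (matriz.getD 0 []).length)
        from propext (by omega),
      hu, hd, hl, hr, ite_true, ite_false, true_and, false_and]
  all_goals
    try rw [show ((i:Int) + -1) = ((i-1 : Nat) : Int) from by omega]
  all_goals
    try rw [show ((j:Int) + -1) = ((j-1 : Nat) : Int) from by omega]
  all_goals
    simp only [PySem.List.pyGetD_natCast, List.nil_append]

theorem bodyA_eq (matriz s : List (List Int)) (i j : Nat) (hi : i < matriz.length)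
    (hj : j < (matriz.getD 0 []).length) :
    (if PySem.List.pyGetD (PySem.List.pyGetD matriz (i:Int) []) (j:Int) 0 = 0 then
      let vecinos := ([((-1:Int),(0:Int)),(1,0),(0,-1),(0,1)]).foldl (fun vecinos dij =>
          let ni := (i:Int) + dij.1
          let nj := (j:Int) + dij.2
          if 0 ≤ ni ∧ ni < (matriz.length : Int) ∧ 0 ≤ nj ∧
              nj < ((matriz.getD 0 []).length : Int) then
            if PySem.List.pyGetD (PySem.List.pyGetD matriz ni []) nj 0 ≠ 0 then
              vecinos ++ [PySem.List.pyGetD (PySem.List.pyGetD matriz ni []) nj 0]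
            else vecinos
          else vecinos) ([] : List Int)
      if 2 ≤ vecinos.length then
        pySet2 s (i:Int) (j:Int) (PySem.Int.truncdiv vecinos.sum vecinos.length)
      else s
    else s) = stepA matriz s i j := by
  unfold stepA pySet2
  rw [vecA matriz i j hi hj]
  simp only [PySem.List.pyGetD_natCast, PySem.List.pySetD_natCast]
  by_cases h0 : (matriz.getD i []).getD j 0 = 0 <;>
    by_cases h2 : 2 ≤ (vecList matriz i j).length <;>
    simp [h0, h2]

theorem innerA (matriz : List (List Int)) (i : Nat) (hi : i < matriz.length)
    (hw : (matriz.getD 0 []).length ≤ (matriz.getD i []).length) :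
    ∀ l, l ≤ (matriz.getD 0 []).length → ∀ s : List (List Int), s.length = matriz.length →
      s.getD i [] = matriz.getD i [] →
      (List.range l).foldl (fun s' j => stepA matriz s' i j) s
        = s.set i ((List.range l).map (cellVal matriz i) ++ (matriz.getD i []).drop l)
  | 0, _, s, hs, hrow => by
    simp only [List.range_zero, List.map_nil, List.foldl_nil, List.nil_append, List.drop_zero]
    rw [← hrow, List.getD_eq_getElem s [] (by omega), List.set_getElem_self]
  | (l+1), hl, s, hs, hrow => by
    rw [List.range_succ, List.foldl_append, List.foldl_cons, List.foldl_nil,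
      innerA matriz i hi hw l (by omega) s hs hrow]
    have his : i < s.length := by omega
    have hlrow : l < (matriz.getD i []).length := by omega
    have hP : ((List.range l).map (cellVal matriz i)).length = l := by simp
    have hdrop : (matriz.getD i []).drop l
        = (matriz.getD i []).getD l 0 :: (matriz.getD i []).drop (l+1) := by
      rw [List.getD_eq_getElem _ _ hlrow]; exact List.drop_eq_getElem_cons hlrow
    have hgetset : ∀ R : List Int, (s.set i R).getD i [] = R := by
      intro R
      rw [List.getD_eq_getElem _ _ (by simpa using his)]
      simp
    have hset : ∀ v : Int,
        (((List.range l).map (cellVal matriz i) ++ (matriz.getD i []).drop l).set l v)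
          = (List.range l).map (cellVal matriz i) ++ v :: (matriz.getD i []).drop (l+1) := by
      intro v
      rw [hdrop]
      simp [hP]
    simp only [List.map_append, List.map_cons, List.map_nil, List.cons_append, List.nil_append,
      List.append_assoc]
    unfold stepA
    by_cases hc : (matriz.getD i []).getD l 0 = 0 ∧ 2 ≤ (vecList matriz i l).length
    · rw [if_pos hc, List.set_set, hgetset, hset]
      have hval : PySem.Int.truncdiv (vecList matriz i l).sum ((vecList matriz i l).length)
          = cellVal matriz i l := by
        unfold cellVal
        rw [if_neg (by simpa using hc.1), if_pos hc.2]
      rw [hval]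
    · rw [if_neg hc]
      have hval : (matriz.getD i []).getD l 0 = cellVal matriz i l := by
        unfold cellVal
        by_cases h0 : (matriz.getD i []).getD l 0 = 0
        · rw [if_neg (by simpa using h0),
            if_neg (fun h2 => hc ⟨h0, h2⟩)]
        · rw [if_pos h0]
      rw [hdrop, hval]

theorem outerA (matriz : List (List Int)) (hpre : Pre_rellenar_huecos matriz) :
    ∀ k, k ≤ matriz.length →
      (List.range k).foldl (fun s i => rowStep matriz s i) matriz
        = (List.range k).map (rowSpec matriz) ++ matriz.drop k
  | 0, _ => by simp
  | (k+1), hk => by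
    rw [List.range_succ, List.foldl_append, List.foldl_cons, List.foldl_nil,
      outerA matriz hpre k (by omega)]
    have hkn : k < matriz.length := by omega
    have hP : ((List.range k).map (rowSpec matriz)).length = k := by simp
    have hT : (((List.range k).map (rowSpec matriz)) ++ matriz.drop k).length = matriz.length := by
      simp [hP]; omega
    have hrowk : (((List.range k).map (rowSpec matriz)) ++ matriz.drop k).getD k []
        = matriz.getD k [] := by
      rw [List.getD_eq_getElem _ _ (by omega), List.getD_eq_getElem _ _ hkn,
        List.getElem_append_right (by omega)]
      simp [hP, List.getElem_drop]
    have hw : (matriz.getD 0 []).length ≤ (matriz.getD k []).length := by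
      apply hpre.2
      rw [List.getD_eq_getElem _ _ hkn]
      exact List.getElem_mem hkn
    unfold rowStep
    rw [innerA matriz k hkn hw (matriz.getD 0 []).length le_rfl _ hT hrowk]
    have hdrop : matriz.drop k = matriz.getD k [] :: matriz.drop (k+1) := by
      rw [List.getD_eq_getElem _ _ hkn]; exact List.drop_eq_getElem_cons hkn
    conv_lhs => rw [hdrop]
    rw [List.map_append]
    simp [hP, rowSpec]

theorem portA_eq_target (matriz : List (List Int)) (hpre : Pre_rellenar_huecos matriz) :
    rellenar_huecos matriz = target matriz := by
  unfold rellenar_huecos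
  rw [PySem.List.pyGetD_zero]
  simp only [PySem.List.slice_none_none, List.map_id', PySem.List.pyRange_zero_natCast,
    List.foldl_map]
  rw [PySem.List.foldl_congr_mem _ _ (fun s i => rowStep matriz s i) _ ?_]
  · rw [outerA matriz hpre matriz.length le_rfl]
    simp [target]
  · intro s i hi
    rw [List.mem_range] at hi
    unfold rowStep
    apply PySem.List.foldl_congr_mem
    intro s' j hj
    rw [List.mem_range] at hj
    exact bodyA_eq matriz s' i j hi hj

-- ---------- B-side: scatter-pass correctness ----------
def tget (t : List (List Int)) (i j : Nat) : Int := (t.getD i []).getD j 0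

def bumpN (t : List (List Int)) (i j : Nat) (v : Int) : List (List Int) :=
  t.set i ((t.getD i []).set j (tget t i j + v))

def ShT (alto ancho : Nat) (t : List (List Int)) : Prop :=
  t.length = alto ∧ ∀ r, r < alto → (t.getD r []).length = ancho

theorem getD_set_row (t : List (List Int)) (i : Nat) (R : List Int) (hi : i < t.length)
    (r : Nat) : (t.set i R).getD r [] = if r = i then R else t.getD r [] := by
  by_cases h : r = i
  · subst h
    rw [List.getD_eq_getElem _ _ (by simpa using hi)]
    simp [hi]
  · rw [if_neg h]
    by_cases hr : r < t.length
    · rw [List.getD_eq_getElem _ _ (by simpa using hr), List.getD_eq_getElem _ _ hr]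
      rw [List.getElem_set_ne (by omega)]
    · rw [List.getD_eq_default _ _ (by simpa using (by omega : t.length ≤ r)),
        List.getD_eq_default _ _ (by omega)]

theorem getD_set_val (l : List Int) (j : Nat) (x : Int) (hj : j < l.length) (c : Nat) :
    (l.set j x).getD c 0 = if c = j then x else l.getD c 0 := by
  by_cases h : c = j
  · subst h
    rw [List.getD_eq_getElem _ _ (by simpa using hj)]
    simp [hj]
  · rw [if_neg h]
    by_cases hc : c < l.length
    · rw [List.getD_eq_getElem _ _ (by simpa using hc), List.getD_eq_getElem _ _ hc]
      rw [List.getElem_set_ne (by omega)]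
    · rw [List.getD_eq_default _ _ (by simpa using (by omega : l.length ≤ c)),
        List.getD_eq_default _ _ (by omega)]

theorem tget_bumpN (alto ancho : Nat) (t : List (List Int)) (hSh : ShT alto ancho t)
    (i j : Nat) (hi : i < alto) (hj : j < ancho) (v : Int) (r c : Nat) :
    tget (bumpN t i j v) r c = tget t r c + (if r = i ∧ c = j then v else 0) := by
  have hlen := hSh.1
  have hit : i < t.length := by omega
  have hjt : j < (t.getD i []).length := by rw [hSh.2 i hi]; exact hj
  unfold tget bumpN
  rw [getD_set_row t i _ hit r]
  by_cases h : r = i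
  · subst h
    rw [if_pos rfl, getD_set_val _ _ _ hjt c]
    by_cases hc : c = j <;> simp [hc, tget]
  · simp [h]

theorem ShT_bumpN (alto ancho : Nat) (t : List (List Int)) (hSh : ShT alto ancho t)
    (i j : Nat) (hi : i < alto) (v : Int) : ShT alto ancho (bumpN t i j v) := by
  have hlen := hSh.1
  have hit : i < t.length := by omega
  refine ⟨by simp [bumpN, hlen], ?_⟩
  intro r hr
  unfold bumpN
  rw [getD_set_row t i _ hit r]
  by_cases h : r = i
  · rw [if_pos h]; subst h; rw [List.length_set]; exact hSh.2 r hr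
  · rw [if_neg h]; exact hSh.2 r hr

theorem tget_condBump (alto ancho : Nat) (t : List (List Int)) (hSh : ShT alto ancho t)
    (P : Prop) [Decidable P] (a b : Nat) (ha : P → a < alto) (hb : P → b < ancho) (v : Int)
    (r c : Nat) :
    tget (if P then bumpN t a b v else t) r c
      = tget t r c + (if P ∧ r = a ∧ c = b then v else 0) := by
  by_cases hP : P
  · rw [if_pos hP, tget_bumpN alto ancho t hSh a b (ha hP) (hb hP) v r c]
    by_cases h : r = a ∧ c = b <;> simp [h, hP]
  · simp [hP]

theorem ShT_condBump (alto ancho : Nat) (t : List (List Int)) (hSh : ShT alto ancho t)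
    (P : Prop) [Decidable P] (a b : Nat) (ha : P → a < alto) (v : Int) :
    ShT alto ancho (if P then bumpN t a b v else t) := by
  by_cases hP : P
  · rw [if_pos hP]; exact ShT_bumpN alto ancho t hSh a b (ha hP) v
  · rwa [if_neg hP]

-- Nat-index form of the scatter-loop body of rellenar_huecos_alt
def sstep (matriz : List (List Int)) (alto ancho : Nat)
    (sc : List (List Int) × List (List Int)) (i j : Nat) :
    List (List Int) × List (List Int) :=
  let v := (matriz.getD i []).getD j 0
  if v ≠ 0 then
    let sc := if 0 < i then (bumpN sc.1 (i-1) j v, bumpN sc.2 (i-1) j 1) else sc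
    let sc := if i + 1 < alto then (bumpN sc.1 (i+1) j v, bumpN sc.2 (i+1) j 1) else sc
    let sc := if 0 < j then (bumpN sc.1 i (j-1) v, bumpN sc.2 i (j-1) 1) else sc
    let sc := if j + 1 < ancho then (bumpN sc.1 i (j+1) v, bumpN sc.2 i (j+1) 1) else sc
    sc
  else sc

-- contribution of processing cell (i, j) to accumulator position (r, c)
def conT (add : Nat → Nat → Int) (alto ancho : Nat) (i j r c : Nat) : Int :=
  (if 0 < i ∧ r = i - 1 ∧ c = j then add i j else 0)
  + (if i + 1 < alto ∧ r = i + 1 ∧ c = j then add i j else 0)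
  + (if 0 < j ∧ r = i ∧ c = j - 1 then add i j else 0)
  + (if j + 1 < ancho ∧ r = i ∧ c = j + 1 then add i j else 0)

def addS (matriz : List (List Int)) (i j : Nat) : Int :=
  if (matriz.getD i []).getD j 0 ≠ 0 then (matriz.getD i []).getD j 0 else 0

def addC (matriz : List (List Int)) (i j : Nat) : Int :=
  if (matriz.getD i []).getD j 0 ≠ 0 then 1 else 0

theorem ShT_sstep (matriz : List (List Int)) (alto ancho : Nat)
    (sc : List (List Int) × List (List Int)) (h1 : ShT alto ancho sc.1)
    (h2 : ShT alto ancho sc.2) (i j : Nat) (hi : i < alto) (hj : j < ancho) :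
    ShT alto ancho (sstep matriz alto ancho sc i j).1 ∧
    ShT alto ancho (sstep matriz alto ancho sc i j).2 := by
  unfold sstep
  by_cases hv : (matriz.getD i []).getD j 0 ≠ 0
  · simp only [if_pos hv, apply_ite Prod.fst, apply_ite Prod.snd]
    constructor
    · apply ShT_condBump _ _ _ ?_ _ _ _ (fun _ => hi)
      apply ShT_condBump _ _ _ ?_ _ _ _ (fun _ => hi)
      apply ShT_condBump _ _ _ ?_ _ _ _ (fun h => by omega)
      apply ShT_condBump _ _ _ ?_ _ _ _ (fun h => by omega)
      exact h1
    · apply ShT_condBump _ _ _ ?_ _ _ _ (fun _ => hi)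
      apply ShT_condBump _ _ _ ?_ _ _ _ (fun _ => hi)
      apply ShT_condBump _ _ _ ?_ _ _ _ (fun h => by omega)
      apply ShT_condBump _ _ _ ?_ _ _ _ (fun h => by omega)
      exact h2
  · simp only [if_neg hv]
    exact ⟨h1, h2⟩

theorem tget_sstep (matriz : List (List Int)) (alto ancho : Nat)
    (sc : List (List Int) × List (List Int)) (h1 : ShT alto ancho sc.1)
    (h2 : ShT alto ancho sc.2) (i j : Nat) (hi : i < alto) (hj : j < ancho) (r c : Nat) :
    tget (sstep matriz alto ancho sc i j).1 r c
      = tget sc.1 r c + conT (addS matriz) alto ancho i j r c ∧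
    tget (sstep matriz alto ancho sc i j).2 r c
      = tget sc.2 r c + conT (addC matriz) alto ancho i j r c := by
  unfold sstep conT
  by_cases hv : (matriz.getD i []).getD j 0 ≠ 0
  · simp only [if_pos hv, apply_ite Prod.fst, apply_ite Prod.snd]
    have ha1 : (0 < i) → i - 1 < alto := fun h => by omega
    have hb1 : (0 < i) → j < ancho := fun _ => hj
    have ha2 : (i + 1 < alto) → i + 1 < alto := fun h => h
    have hb2 : (i + 1 < alto) → j < ancho := fun _ => hj
    have ha3 : (0 < j) → i < alto := fun _ => hi
    have hb3 : (0 < j) → j - 1 < ancho := fun h => by omega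
    have ha4 : (j + 1 < ancho) → i < alto := fun _ => hi
    have hb4 : (j + 1 < ancho) → j + 1 < ancho := fun h => h
    have s12 := ShT_condBump alto ancho sc.1 h1 (0 < i) (i-1) j ha1 ((matriz.getD i []).getD j 0)
    have s13 := ShT_condBump alto ancho _ s12 (i + 1 < alto) (i+1) j ha2 ((matriz.getD i []).getD j 0)
    have s14 := ShT_condBump alto ancho _ s13 (0 < j) i (j-1) ha3 ((matriz.getD i []).getD j 0)
    have s22 := ShT_condBump alto ancho sc.2 h2 (0 < i) (i-1) j ha1 (1 : Int)
    have s23 := ShT_condBump alto ancho _ s22 (i + 1 < alto) (i+1) j ha2 (1 : Int)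
    have s24 := ShT_condBump alto ancho _ s23 (0 < j) i (j-1) ha3 (1 : Int)
    constructor
    · rw [tget_condBump alto ancho _ s14 (j + 1 < ancho) i (j+1) ha4 hb4 _ r c,
          tget_condBump alto ancho _ s13 (0 < j) i (j-1) ha3 hb3 _ r c,
          tget_condBump alto ancho _ s12 (i + 1 < alto) (i+1) j ha2 hb2 _ r c,
          tget_condBump alto ancho _ h1 (0 < i) (i-1) j ha1 hb1 _ r c]
      simp only [addS, if_pos hv]
      ring
    · rw [tget_condBump alto ancho _ s24 (j + 1 < ancho) i (j+1) ha4 hb4 _ r c,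
          tget_condBump alto ancho _ s23 (0 < j) i (j-1) ha3 hb3 _ r c,
          tget_condBump alto ancho _ s22 (i + 1 < alto) (i+1) j ha2 hb2 _ r c,
          tget_condBump alto ancho _ h2 (0 < i) (i-1) j ha1 hb1 _ r c]
      simp only [addC, if_pos hv]
      ring
  · simp only [if_neg hv]
    push_neg at hv
    have hS : addS matriz i j = 0 := by unfold addS; rw [hv]; simp
    have hC : addC matriz i j = 0 := by unfold addC; rw [hv]; simp
    rw [hS, hC]
    simp

theorem scatter_foldl (matriz : List (List Int)) (alto ancho : Nat) :
    ∀ (L : List (Nat × Nat)), (∀ p ∈ L, p.1 < alto ∧ p.2 < ancho) →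
    ∀ sc : List (List Int) × List (List Int), ShT alto ancho sc.1 → ShT alto ancho sc.2 →
    ∀ r c : Nat,
    tget ((L.foldl (fun sc p => sstep matriz alto ancho sc p.1 p.2)) sc).1 r c
      = tget sc.1 r c + (L.map (fun p => conT (addS matriz) alto ancho p.1 p.2 r c)).sum ∧
    tget ((L.foldl (fun sc p => sstep matriz alto ancho sc p.1 p.2)) sc).2 r c
      = tget sc.2 r c + (L.map (fun p => conT (addC matriz) alto ancho p.1 p.2 r c)).sum
  | [], _, sc, h1, h2, r, c => by simp
  | (p :: L), hL, sc, h1, h2, r, c => by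
    have hp := hL p (by simp)
    have hsh := ShT_sstep matriz alto ancho sc h1 h2 p.1 p.2 hp.1 hp.2
    have hstep := tget_sstep matriz alto ancho sc h1 h2 p.1 p.2 hp.1 hp.2 r c
    have ih := scatter_foldl matriz alto ancho L (fun q hq => hL q (by simp [hq]))
      (sstep matriz alto ancho sc p.1 p.2) hsh.1 hsh.2 r c
    simp only [List.foldl_cons, List.map_cons, List.sum_cons]
    constructor
    · rw [ih.1, hstep.1]; ring
    · rw [ih.2, hstep.2]; ring

theorem ShT_zeroTable (alto ancho : Nat) : ShT alto ancho (zeroTable alto ancho) := by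
  refine ⟨by simp [zeroTable], ?_⟩
  intro r hr
  unfold zeroTable
  rw [List.getD_eq_getElem _ _ (by simpa using hr)]
  simp

theorem zeroTable_row (alto ancho r : Nat) :
    (zeroTable alto ancho).getD r [] = if r < alto then List.replicate ancho 0 else [] := by
  unfold zeroTable
  rcases Nat.lt_or_ge r alto with hr | hr
  · rw [if_pos hr, List.getD_eq_getElem _ _ (by simpa using hr)]
    simp
  · rw [if_neg (by omega), List.getD_eq_default _ _ (by simpa using hr)]

theorem tget_zeroTable (alto ancho : Nat) (r c : Nat) : tget (zeroTable alto ancho) r c = 0 := by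
  unfold tget
  rw [zeroTable_row]
  rcases Nat.lt_or_ge r alto with hr | hr
  · rw [if_pos hr]
    rcases Nat.lt_or_ge c ancho with hc | hc
    · rw [List.getD_eq_getElem _ _ (by simpa using hc)]
      simp
    · rw [List.getD_eq_default _ _ (by simpa using hc)]
  · rw [if_neg (by omega)]
    simp

theorem sum_map_flatMap {α β : Type} (l : List α) (f : α → List β) (g : β → Int) :
    ((l.flatMap f).map g).sum = (l.map (fun i => ((f i).map g).sum)).sum := by
  induction l with
  | nil => simp
  | cons x xs ih => simp [ih]

theorem sum_map_add {α : Type} (l : List α) (f g : α → Int) :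
    (l.map (fun k => f k + g k)).sum = (l.map f).sum + (l.map g).sum := by
  induction l with
  | nil => simp
  | cons x xs ih =>
    simp only [List.map_cons, List.sum_cons, ih]
    ring

theorem sum_range_point (n q : Nat) (a : Nat → Int) :
    ((List.range n).map (fun k => if q = k then a k else 0)).sum = if q < n then a q else 0 := by
  induction n with
  | zero => simp
  | succ m ih =>
    rw [List.range_succ]
    simp only [List.map_append, List.sum_append, ih, List.map_cons, List.map_nil,
      List.sum_cons, List.sum_nil]
    by_cases h : q = m <;> by_cases h2 : q < m <;> simp [h, h2] <;> omega

def allCells (alto ancho : Nat) : List (Nat × Nat) :=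
  (List.range alto).flatMap (fun i => (List.range ancho).map (fun j => (i, j)))

theorem allCells_bounds (alto ancho : Nat) :
    ∀ p ∈ allCells alto ancho, p.1 < alto ∧ p.2 < ancho := by
  intro p hp
  unfold allCells at hp
  simp only [List.mem_flatMap, List.mem_map, List.mem_range] at hp
  obtain ⟨i, hi, j, hj, rfl⟩ := hp
  exact ⟨hi, hj⟩

theorem sum_conT (add : Nat → Nat → Int) (alto ancho r c : Nat) (hr : r < alto)
    (hc : c < ancho) :
    ((allCells alto ancho).map (fun p => conT add alto ancho p.1 p.2 r c)).sum
      = (if r + 1 < alto then add (r+1) c else 0)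
      + (if 0 < r then add (r-1) c else 0)
      + (if c + 1 < ancho then add r (c+1) else 0)
      + (if 0 < c then add r (c-1) else 0) := by
  unfold allCells
  rw [sum_map_flatMap]
  have inner : ∀ i : Nat,
      (((List.range ancho).map (fun j => (i, j))).map
        (fun p => conT add alto ancho p.1 p.2 r c)).sum
      = (if r + 1 = i then add i c else 0)
      + (if i + 1 < alto ∧ r = i + 1 then add i c else 0)
      + (if r = i then (if c + 1 < ancho then add i (c+1) else 0) else 0)
      + (if r = i then (if 0 < c then add i (c-1) else 0) else 0) := by
    intro i
    rw [List.map_map]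
    have hcomp : ((List.range ancho).map ((fun p => conT add alto ancho p.1 p.2 r c) ∘
        (fun j => (i, j)))) = (List.range ancho).map (fun j => conT add alto ancho i j r c) :=
      rfl
    rw [hcomp]
    unfold conT
    rw [sum_map_add, sum_map_add, sum_map_add]
    have e1 : ((List.range ancho).map (fun j => if 0 < i ∧ r = i - 1 ∧ c = j
        then add i j else 0)).sum = (if r + 1 = i then add i c else 0) := by
      rw [List.map_congr_left (g := fun k => if c = k then
          (if r + 1 = i then add i c else 0) else 0) ?_, sum_range_point, if_pos hc]
      intro j hj
      dsimp only
      split_ifs <;> first | rfl | (subst_eqs; rfl) | omega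
    have e2 : ((List.range ancho).map (fun j => if i + 1 < alto ∧ r = i + 1 ∧ c = j
        then add i j else 0)).sum = (if i + 1 < alto ∧ r = i + 1 then add i c else 0) := by
      rw [List.map_congr_left (g := fun k => if c = k then
          (if i + 1 < alto ∧ r = i + 1 then add i c else 0) else 0) ?_, sum_range_point,
          if_pos hc]
      intro j hj
      dsimp only
      split_ifs <;> first | rfl | (subst_eqs; rfl) | omega
    have e3 : ((List.range ancho).map (fun j => if 0 < j ∧ r = i ∧ c = j - 1
        then add i j else 0)).sum = (if r = i then (if c + 1 < ancho then add i (c+1) else 0)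
        else 0) := by
      rw [List.map_congr_left (g := fun k => if c + 1 = k then
          (if r = i then (if c + 1 < ancho then add i (c+1) else 0) else 0) else 0) ?_,
          sum_range_point]
      · rcases Nat.lt_or_ge (c+1) ancho with hcc | hcc
        · rw [if_pos hcc]
        · rw [if_neg (by omega)]
          by_cases hri : r = i
          · rw [if_pos hri, if_neg (by omega : ¬ (c + 1 < ancho))]
          · rw [if_neg hri]
      · intro j hj
        have hj' : j < ancho := List.mem_range.mp hj
        dsimp only
        split_ifs <;> first | rfl | (subst_eqs; rfl) | omega
    have e4 : ((List.range ancho).map (fun j => if j + 1 < ancho ∧ r = i ∧ c = j + 1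
        then add i j else 0)).sum = (if r = i then (if 0 < c then add i (c-1) else 0)
        else 0) := by
      rw [List.map_congr_left (g := fun k => if c - 1 = k then
          (if 0 < c then (if r = i then add i (c-1) else 0) else 0) else 0) ?_,
          sum_range_point, if_pos (by omega : c - 1 < ancho)]
      · by_cases h0 : 0 < c <;> by_cases hri : r = i <;> simp [h0, hri]
      · intro j hj
        have hj' : j < ancho := List.mem_range.mp hj
        dsimp only
        split_ifs <;> first | rfl | (subst_eqs; rfl) | omega
    rw [e1, e2, e3, e4]
  rw [List.map_congr_left (fun i _ => inner i)]
  rw [sum_map_add, sum_map_add, sum_map_add]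
  have f1 : ((List.range alto).map (fun i => if r + 1 = i then add i c else 0)).sum
      = (if r + 1 < alto then add (r+1) c else 0) := by
    rw [sum_range_point]
  have f2 : ((List.range alto).map (fun i => if i + 1 < alto ∧ r = i + 1 then add i c
      else 0)).sum = (if 0 < r then add (r-1) c else 0) := by
    rw [List.map_congr_left (g := fun k => if r - 1 = k then
        (if 0 < r then add (r-1) c else 0) else 0) ?_, sum_range_point,
        if_pos (by omega : r - 1 < alto)]
    intro i hi
    have hi' : i < alto := List.mem_range.mp hi
    dsimp only
    split_ifs <;> first | rfl | (subst_eqs; rfl) | omega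
  have f3 : ((List.range alto).map (fun i => if r = i then
      (if c + 1 < ancho then add i (c+1) else 0) else 0)).sum
      = (if c + 1 < ancho then add r (c+1) else 0) := by
    rw [List.map_congr_left (g := fun k => if r = k then
        (if c + 1 < ancho then add r (c+1) else 0) else 0) ?_, sum_range_point, if_pos hr]
    intro i hi
    dsimp only
    split_ifs <;> first | rfl | (subst_eqs; rfl) | omega
  have f4 : ((List.range alto).map (fun i => if r = i then
      (if 0 < c then add i (c-1) else 0) else 0)).sum
      = (if 0 < c then add r (c-1) else 0) := by
    rw [List.map_congr_left (g := fun k => if r = k then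
        (if 0 < c then add r (c-1) else 0) else 0) ?_, sum_range_point, if_pos hr]
    intro i hi
    dsimp only
    split_ifs <;> first | rfl | (subst_eqs; rfl) | omega
  rw [f1, f2, f3, f4]

theorem sum_condAppend (P : Prop) [Decidable P] (l : List Int) (x : Int) :
    (if P then l ++ [x] else l).sum = l.sum + (if P then x else 0) := by
  split_ifs <;> simp

theorem len_condAppend (P : Prop) [Decidable P] (l : List Int) (x : Int) :
    (if P then l ++ [x] else l).length = l.length + (if P then 1 else 0) := by
  split_ifs <;> simp

theorem ite_and_split (b n : Prop) [Decidable b] [Decidable n] (v : Int) :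
    (if b ∧ n then v else 0) = (if b then (if n then v else 0) else 0) := by
  split_ifs <;> simp_all

theorem vecList_sum (matriz : List (List Int)) (r c : Nat) :
    (vecList matriz r c).sum
      = (if r + 1 < matriz.length then addS matriz (r+1) c else 0)
      + (if 0 < r then addS matriz (r-1) c else 0)
      + (if c + 1 < (matriz.getD 0 []).length then addS matriz r (c+1) else 0)
      + (if 0 < c then addS matriz r (c-1) else 0) := by
  unfold vecList addS
  simp only [sum_condAppend, List.sum_nil, ite_and_split]
  ring

theorem vecList_length (matriz : List (List Int)) (r c : Nat) :
    ((vecList matriz r c).length : Int)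
      = (if r + 1 < matriz.length then addC matriz (r+1) c else 0)
      + (if 0 < r then addC matriz (r-1) c else 0)
      + (if c + 1 < (matriz.getD 0 []).length then addC matriz r (c+1) else 0)
      + (if 0 < c then addC matriz r (c-1) else 0) := by
  unfold vecList addC
  simp only [len_condAppend, List.length_nil]
  push_cast [apply_ite (fun n : Nat => (n : Int))]
  simp only [ite_and_split]
  ring

-- the scatter pass of rellenar_huecos_alt, in Nat form
def scPair (matriz : List (List Int)) : List (List Int) × List (List Int) :=
  (allCells matriz.length (matriz.getD 0 []).length).foldl
    (fun sc p => sstep matriz matriz.length (matriz.getD 0 []).length sc p.1 p.2)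
    (zeroTable matriz.length (matriz.getD 0 []).length,
     zeroTable matriz.length (matriz.getD 0 []).length)

theorem scPair_tget (matriz : List (List Int)) (r c : Nat) (hr : r < matriz.length)
    (hc : c < (matriz.getD 0 []).length) :
    tget (scPair matriz).1 r c = (vecList matriz r c).sum ∧
    tget (scPair matriz).2 r c = ((vecList matriz r c).length : Int) := by
  have h := scatter_foldl matriz matriz.length (matriz.getD 0 []).length
    (allCells matriz.length (matriz.getD 0 []).length)
    (allCells_bounds _ _)
    (zeroTable matriz.length (matriz.getD 0 []).length,
     zeroTable matriz.length (matriz.getD 0 []).length)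
    (ShT_zeroTable _ _) (ShT_zeroTable _ _) r c
  unfold scPair
  constructor
  · rw [h.1, tget_zeroTable, sum_conT _ _ _ _ _ hr hc, vecList_sum]
    ring
  · rw [h.2, tget_zeroTable, sum_conT _ _ _ _ _ hr hc, vecList_length]
    ring

theorem foldl_flatMap_gen {α β σ : Type} (l : List α) (g : α → List β) (h : σ → β → σ) :
    ∀ init, (l.flatMap g).foldl h init = l.foldl (fun s i => (g i).foldl h s) init := by
  induction l with
  | nil => intro init; simp
  | cons x xs ih => intro init; simp [List.foldl_append, ih]

theorem nested_eq_allCells {σ : Type} (alto ancho : Nat) (f : σ → Nat → Nat → σ) (init : σ) :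
    (List.range alto).foldl (fun s i => (List.range ancho).foldl (fun s j => f s i j) s) init
      = (allCells alto ancho).foldl (fun s p => f s p.1 p.2) init := by
  unfold allCells
  rw [foldl_flatMap_gen]
  congr 1
  funext s i
  rw [List.foldl_map]

theorem incr2_natCast (t : List (List Int)) (a b : Nat) (v : Int) :
    incr2 t (a : Int) (b : Int) v = bumpN t a b v := by
  simp [incr2, bumpN, tget]

theorem bodyB_eq (matriz : List (List Int)) (sc : List (List Int) × List (List Int))
    (i j : Nat) (hi : i < matriz.length) (hj : j < (matriz.getD 0 []).length) :
    (let v := PySem.List.pyGetD (PySem.List.pyGetD matriz (i:Int) []) (j:Int) 0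
     if v ≠ 0 then
       let sc := if 0 < (i:Int) then
           (incr2 sc.1 ((i:Int)-1) (j:Int) v, incr2 sc.2 ((i:Int)-1) (j:Int) 1) else sc
       let sc := if (i:Int) + 1 < (matriz.length : Int) then
           (incr2 sc.1 ((i:Int)+1) (j:Int) v, incr2 sc.2 ((i:Int)+1) (j:Int) 1) else sc
       let sc := if 0 < (j:Int) then
           (incr2 sc.1 (i:Int) ((j:Int)-1) v, incr2 sc.2 (i:Int) ((j:Int)-1) 1) else sc
       let sc := if (j:Int) + 1 < ((matriz.getD 0 []).length : Int) then
           (incr2 sc.1 (i:Int) ((j:Int)+1) v, incr2 sc.2 (i:Int) ((j:Int)+1) 1) else sc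
       sc
     else sc)
      = sstep matriz matriz.length (matriz.getD 0 []).length sc i j := by
  unfold sstep
  simp only [PySem.List.pyGetD_natCast]
  by_cases hv : (matriz.getD i []).getD j 0 ≠ 0
  · simp only [if_pos hv]
    rw [show ((i:Int) + 1) = ((i+1 : Nat) : Int) from by omega,
        show ((j:Int) + 1) = ((j+1 : Nat) : Int) from by omega]
    by_cases hu : 0 < i <;> by_cases hd : i + 1 < matriz.length <;> by_cases hl : 0 < j <;>
      by_cases hr : j + 1 < (matriz.getD 0 []).length
    all_goals
      simp only [
        show (0 < (i:Int)) = (0 < i) from propext (by omega),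
        show (((i+1:Nat):Int) < ((matriz.length:Nat) : Int)) = (i + 1 < matriz.length)
          from propext (by omega),
        show (0 < (j:Int)) = (0 < j) from propext (by omega),
        show (((j+1:Nat):Int) < (((matriz.getD 0 []).length:Nat) : Int))
          = (j + 1 < (matriz.getD 0 []).length) from propext (by omega),
        hu, hd, hl, hr, ite_true, ite_false]
    all_goals
      try rw [show ((i:Int) - 1) = ((i-1 : Nat) : Int) from by omega]
    all_goals
      try rw [show ((j:Int) - 1) = ((j-1 : Nat) : Int) from by omega]
    all_goals
      simp only [incr2_natCast]
  · simp only [if_neg hv]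

theorem bodyFill_eq (matriz s : List (List Int)) (i j : Nat) (hi : i < matriz.length)
    (hj : j < (matriz.getD 0 []).length) :
    (if PySem.List.pyGetD (PySem.List.pyGetD matriz (i:Int) []) (j:Int) 0 = 0 ∧
        2 ≤ PySem.List.pyGetD (PySem.List.pyGetD (scPair matriz).2 (i:Int) []) (j:Int) 0 then
      pySet2 s (i:Int) (j:Int) (PySem.Int.truncdiv
        (PySem.List.pyGetD (PySem.List.pyGetD (scPair matriz).1 (i:Int) []) (j:Int) 0)
        (PySem.List.pyGetD (PySem.List.pyGetD (scPair matriz).2 (i:Int) []) (j:Int) 0))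
    else s) = stepA matriz s i j := by
  have h := scPair_tget matriz i j hi hj
  unfold stepA pySet2
  simp only [PySem.List.pyGetD_natCast, PySem.List.pySetD_natCast]
  rw [show ((scPair matriz).2.getD i []).getD j 0 = ((vecList matriz i j).length : Int) from h.2,
      show ((scPair matriz).1.getD i []).getD j 0 = (vecList matriz i j).sum from h.1]
  split_ifs with hA hB hB
  · rfl
  · exact absurd ⟨hA.1, by exact_mod_cast hA.2⟩ hB
  · exact absurd ⟨hB.1, by exact_mod_cast hB.2⟩ hA
  · rfl

-- the two passes of rellenar_huecos_alt, as standalone terms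
def scatterInt (matriz : List (List Int)) : List (List Int) × List (List Int) :=
  (PySem.List.pyRange 0 (matriz.length : Int) 1).foldl (fun sc i =>
    (PySem.List.pyRange 0 ((PySem.List.pyGetD matriz 0 []).length : Int) 1).foldl (fun sc j =>
      let v := PySem.List.pyGetD (PySem.List.pyGetD matriz i []) j 0
      if v ≠ 0 then
        let sc := if 0 < i then (incr2 sc.1 (i-1) j v, incr2 sc.2 (i-1) j 1) else sc
        let sc := if i + 1 < (matriz.length : Int) then
            (incr2 sc.1 (i+1) j v, incr2 sc.2 (i+1) j 1) else sc
        let sc := if 0 < j then (incr2 sc.1 i (j-1) v, incr2 sc.2 i (j-1) 1) else sc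
        let sc := if j + 1 < ((PySem.List.pyGetD matriz 0 []).length : Int) then
            (incr2 sc.1 i (j+1) v, incr2 sc.2 i (j+1) 1) else sc
        sc
      else sc) sc)
    (zeroTable matriz.length (PySem.List.pyGetD matriz 0 []).length,
     zeroTable matriz.length (PySem.List.pyGetD matriz 0 []).length)

def fillInt (matriz : List (List Int)) (sc : List (List Int) × List (List Int)) :
    List (List Int) :=
  (PySem.List.pyRange 0 (matriz.length : Int) 1).foldl (fun nueva i =>
    (PySem.List.pyRange 0 ((PySem.List.pyGetD matriz 0 []).length : Int) 1).foldl (fun nueva j =>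
      if PySem.List.pyGetD (PySem.List.pyGetD matriz i []) j 0 = 0 ∧
          2 ≤ PySem.List.pyGetD (PySem.List.pyGetD sc.2 i []) j 0 then
        pySet2 nueva i j (PySem.Int.truncdiv
          (PySem.List.pyGetD (PySem.List.pyGetD sc.1 i []) j 0)
          (PySem.List.pyGetD (PySem.List.pyGetD sc.2 i []) j 0))
      else nueva) nueva) (matriz.map (fun fila => PySem.List.slice fila none none))

theorem scatterInt_eq (matriz : List (List Int)) : scatterInt matriz = scPair matriz := by
  unfold scatterInt
  simp only [PySem.List.pyGetD_zero, PySem.List.pyRange_zero_natCast, List.foldl_map]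
  rw [PySem.List.foldl_congr_mem _ _ (fun sc i => (List.range (matriz.getD 0 []).length).foldl
    (fun sc j => sstep matriz matriz.length (matriz.getD 0 []).length sc i j) sc) _ ?_]
  · rw [nested_eq_allCells]
    rfl
  · intro sc i hi
    rw [List.mem_range] at hi
    apply PySem.List.foldl_congr_mem
    intro sc' j hj
    rw [List.mem_range] at hj
    exact bodyB_eq matriz sc' i j hi hj

theorem fillInt_eq (matriz : List (List Int)) (hpre : Pre_rellenar_huecos matriz) :
    fillInt matriz (scPair matriz) = target matriz := by
  unfold fillInt
  simp only [PySem.List.pyGetD_zero, PySem.List.slice_none_none, List.map_id',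
    PySem.List.pyRange_zero_natCast, List.foldl_map]
  rw [PySem.List.foldl_congr_mem _ _ (fun s i => rowStep matriz s i) _ ?_]
  · rw [outerA matriz hpre matriz.length le_rfl]
    simp [target]
  · intro s i hi
    rw [List.mem_range] at hi
    unfold rowStep
    apply PySem.List.foldl_congr_mem
    intro s' j hj
    rw [List.mem_range] at hj
    exact bodyFill_eq matriz s' i j hi hj

set_option maxHeartbeats 1000000 in
theorem portB_eq_target (matriz : List (List Int)) (hpre : Pre_rellenar_huecos matriz) :
    rellenar_huecos_alt matriz = target matriz := by
  show fillInt matriz (scatterInt matriz) = target matriz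
  rw [scatterInt_eq, fillInt_eq matriz hpre]

-- ===== VERDICT (by name: the statement is the Claim_ definition above) =====
theorem rellenar_huecos_spec : Claim_equal_rellenar_huecos := by
  intro matriz _ hpre
  unfold Spec_rellenar_huecos
  rw [portA_eq_target matriz hpre, portB_eq_target matriz hpre]
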